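-- pv_equiv track=rewrite | github.com/ifarlab/MARVer | marver/src/marver_s/odt.py | parse
-- ===== SOURCE A (Python) =====
-- def parse(str):
--     str = str.replace(' ', '')
--     list = str.split(',')
--
--     s = ''
--     for item in range(len(list)):
--         s += list[item]
--         if item != len(list)-1:
--             s += ' '
--
--     return s
-- ===== SOURCE B (Python) =====
-- def parse(str):
--     return str.replace(' ', '').replace(',', ' ')
-- ===== Notes on version B (the rewrite author's own statement) =====
-- stated objective: idiomatic
-- what changed: Replaced the split-into-list plus manual index loop with string concatenation by two chained str.replace passes (no tokenization, no join loop).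
import Mathlib
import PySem

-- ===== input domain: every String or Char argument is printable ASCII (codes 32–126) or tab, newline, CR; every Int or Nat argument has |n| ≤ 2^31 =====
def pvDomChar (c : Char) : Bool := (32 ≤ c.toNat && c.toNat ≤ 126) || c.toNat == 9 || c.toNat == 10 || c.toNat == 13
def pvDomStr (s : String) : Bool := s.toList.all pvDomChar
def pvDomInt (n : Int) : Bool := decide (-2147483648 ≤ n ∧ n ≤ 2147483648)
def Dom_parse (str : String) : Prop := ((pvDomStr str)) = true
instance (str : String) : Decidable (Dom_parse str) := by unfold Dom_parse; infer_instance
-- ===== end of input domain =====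

-- B replaces A's split-into-list + index loop with manual concatenation by two chained str.replace passes (idiomatic).

-- ===== PORT A =====
-- A: remove spaces, split on ',', then rebuild the string joining the pieces with ' ' in an index loop.
def parse (str : String) : String :=
  let str1 := PySem.Chars.replace str.toList [' '] []    -- str = str.replace(' ', '')
  let lst := PySem.Chars.splitOn str1 [',']              -- list = str.split(',')
  -- s = ''; for item in range(len(list)): s += list[item]; if item != len(list)-1: s += ' '
  let s := (PySem.List.pyRange 0 (lst.length : Int) 1).foldl
      (fun s item =>
        let s := s ++ PySem.List.pyGetD lst item []
        if item ≠ (lst.length : Int) - 1 then s ++ [' '] else s) []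
  String.ofList s

-- ===== PORT B =====
-- B: return str.replace(' ', '').replace(',', ' ')
def parse_alt (str : String) : String :=
  String.ofList (PySem.Chars.replace (PySem.Chars.replace str.toList [' '] []) [','] [' '])

-- ===== PRECONDITION & SPEC =====
def Spec_parse (str : String) (out : String) : Prop := out = parse_alt str
instance (str : String) (out : String) : Decidable (Spec_parse str out) := by unfold Spec_parse; infer_instance

-- ===== CLAIM (what is proved, stated in full; the proofs are below) =====
def Claim_equal_parse : Prop := ∀ (str : String), Dom_parse str → Spec_parse str (parse str)

-- ===== LEMMAS AND PROOFS =====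

-- Substituting each occurrence of c by `new`, as a flatMap.
def flatRep (c : Char) (new : List Char) (l : List Char) : List Char :=
  l.flatMap (fun x => if x = c then new else [x])

theorem replace_go_single (c : Char) (new : List Char) :
    ∀ fuel (l acc : List Char), l.length ≤ fuel →
      PySem.Chars.replace.go [c] new fuel l acc = acc.reverse ++ flatRep c new l := by
  intro fuel
  induction fuel with
  | zero => intro l acc h; simp at h; subst h; simp [PySem.Chars.replace.go, flatRep]
  | succ f ih =>
    intro l acc h
    cases l with
    | nil => simp [PySem.Chars.replace.go, flatRep]
    | cons x t =>
      rw [PySem.Chars.replace.go]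
      by_cases hx : x = c
      · subst hx
        simp only [List.isPrefixOf, beq_self_eq_true, Bool.true_and, if_pos]
        rw [ih _ _ (by simpa using Nat.le_of_succ_le_succ h)]
        simp [flatRep]
      · have hp : ([c].isPrefixOf (x :: t)) = false := by
          simp [List.isPrefixOf]; exact fun hh => hx hh.symm
        rw [hp]
        simp only [Bool.false_eq_true, if_neg, not_false_iff]
        rw [ih _ _ (by simpa using Nat.le_of_succ_le_succ h)]
        simp [flatRep, hx]

theorem replace_single (c : Char) (new : List Char) (l : List Char) :
    PySem.Chars.replace l [c] new = flatRep c new l := by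
  rw [PySem.Chars.replace]
  simp only [List.isEmpty_cons, Bool.false_eq_true, if_neg, not_false_iff]
  exact replace_go_single c new l.length l [] (le_refl _)

-- Single-character split, structurally.
def sp (c : Char) : List Char → List (List Char)
  | [] => [[]]
  | x :: t => if x = c then [] :: sp c t else (sp c t).modifyHead (x :: ·)

theorem sp_ne_nil (c : Char) (l : List Char) : sp c l ≠ [] := by
  induction l with
  | nil => simp [sp]
  | cons x t ih =>
    simp only [sp]
    split
    · simp
    · cases h : sp c t with
      | nil => exact absurd h ih
      | cons y ys => simp [List.modifyHead]

theorem modifyHead_fun_id {α : Type} (l : List α) : List.modifyHead (fun x => x) l = l := by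
  cases l <;> simp

theorem splitOn_go_single (c : Char) :
    ∀ fuel (l cur : List Char) (acc : List (List Char)), l.length < fuel →
      PySem.Chars.splitOn.go [c] fuel l cur acc
        = acc.reverse ++ (sp c l).modifyHead (cur.reverse ++ ·) := by
  intro fuel
  induction fuel with
  | zero => intro l cur acc h; omega
  | succ f ih =>
    intro l cur acc h
    cases l with
    | nil => simp [PySem.Chars.splitOn.go, sp]
    | cons x t =>
      rw [PySem.Chars.splitOn.go]
      by_cases hx : x = c
      · subst hx
        simp only [List.isPrefixOf, beq_self_eq_true, Bool.true_and, if_pos]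
        rw [ih _ _ _ (by simpa using Nat.lt_of_succ_lt_succ h)]
        simp [sp, modifyHead_fun_id]
      · have hp : ([c].isPrefixOf (x :: t)) = false := by
          simp [List.isPrefixOf]; exact fun hh => hx hh.symm
        rw [hp]
        simp only [Bool.false_eq_true, if_neg, not_false_iff]
        rw [ih _ _ _ (by simpa using Nat.lt_of_succ_lt_succ h)]
        simp only [sp, if_neg hx]
        obtain ⟨y, ys, hy⟩ := List.exists_cons_of_ne_nil (sp_ne_nil c t)
        simp [hy, List.modifyHead]

theorem splitOn_single (c : Char) (l : List Char) :
    PySem.Chars.splitOn l [c] = sp c l := by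
  rw [PySem.Chars.splitOn]
  rw [splitOn_go_single c _ _ _ _ (by omega)]
  simp [modifyHead_fun_id]

theorem intercalate_cons₂ (s a b : List Char) (t : List (List Char)) :
    List.intercalate s (a :: b :: t) = a ++ s ++ List.intercalate s (b :: t) := by
  simp [List.intercalate, List.intersperse]

theorem intercalate_one (s q : List Char) : List.intercalate s [q] = q := by
  simp [List.intercalate]

theorem intercalate_append_singleton (s q : List Char) :
    ∀ qs : List (List Char),
      List.intercalate s (qs ++ [q]) = qs.flatMap (fun p => p ++ s) ++ q := by
  intro qs
  induction qs with
  | nil => simp [intercalate_one]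
  | cons a t ih =>
    cases t with
    | nil => simp [List.cons_append, intercalate_cons₂, intercalate_one]
    | cons b u => simp_all [List.cons_append, intercalate_cons₂]

-- join-with-' ' of the comma split IS comma→space substitution
theorem interSp : ∀ l : List Char,
    List.intercalate [' '] (sp ',' l) = flatRep ',' [' '] l := by
  intro l
  induction l with
  | nil => simp [sp, intercalate_one, flatRep]
  | cons x t ih =>
    by_cases hx : x = ','
    · subst hx
      rw [show sp ',' (',' :: t) = [] :: sp ',' t from by simp [sp]]
      obtain ⟨y, ys, hy⟩ := List.exists_cons_of_ne_nil (sp_ne_nil ',' t)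
      rw [hy, intercalate_cons₂, ← hy, ih]
      simp [flatRep]
    · rw [show sp ',' (x :: t) = (sp ',' t).modifyHead (x :: ·) from by simp [sp, hx]]
      obtain ⟨y, ys, hy⟩ := List.exists_cons_of_ne_nil (sp_ne_nil ',' t)
      rw [hy] at ih ⊢
      simp only [List.modifyHead]
      cases ys with
      | nil => simp_all [intercalate_one, flatRep]
      | cons b u =>
        rw [intercalate_cons₂] at ih ⊢
        simp_all [flatRep]

-- A's index loop over the pieces is join-with-' '
theorem loopA (parts : List (List Char)) (h : parts ≠ []) :
    (PySem.List.pyRange 0 (parts.length : Int) 1).foldl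
      (fun s item =>
        let s := s ++ PySem.List.pyGetD parts item []
        if item ≠ (parts.length : Int) - 1 then s ++ [' '] else s) []
      = List.intercalate [' '] parts := by
  induction parts using List.reverseRecOn with
  | nil => exact absurd rfl h
  | append_singleton qs q _ => ?_
  have hlen : ((qs ++ [q]).length : Int) = (qs.length : Int) + 1 := by simp
  rw [hlen, PySem.List.pyRange_one_succ_right (by positivity), List.foldl_append]
  have hpre : (PySem.List.pyRange 0 (qs.length : Int) 1).foldl
      (fun s item =>
        let s := s ++ PySem.List.pyGetD (qs ++ [q]) item []
        if item ≠ (qs.length : Int) + 1 - 1 then s ++ [' '] else s) []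
      = qs.foldl (fun a v => a ++ (v ++ [' '])) [] := by
    rw [PySem.List.foldl_congr_mem (g := fun s item => s ++ (PySem.List.pyGetD qs item [] ++ [' ']))]
    · exact PySem.List.foldl_pyRange_zero_pyGetD' qs [] (fun a v => a ++ (v ++ [' '])) []
    · intro a x hx
      rw [PySem.List.mem_pyRange_one] at hx
      have hne : x ≠ (qs.length : Int) + 1 - 1 := by omega
      rw [PySem.List.pyGetD_eq_getElem (qs ++ [q]) [] hx.1 (by simp; omega),
          PySem.List.pyGetD_eq_getElem qs [] hx.1 (by exact_mod_cast hx.2),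
          List.getElem_append_left (by omega)]
      simp [List.append_assoc]
      omega
  rw [hpre]
  simp only [List.foldl_cons, List.foldl_nil, ne_eq, add_sub_cancel_right, not_true_eq_false,
    if_false]
  rw [PySem.List.pyGetD_eq_getElem (qs ++ [q]) [] (by positivity) (by simp)]
  rw [intercalate_append_singleton, PySem.List.foldl_append_eq_flatMap (fun p => p ++ [' ']) qs []]
  simp

-- ===== VERDICT (by name: the statement is the Claim_ definition above) =====
theorem parse_spec : Claim_equal_parse := by
  intro str _
  unfold Spec_parse parse parse_alt
  simp only []
  rw [splitOn_single, loopA _ (sp_ne_nil ',' _), interSp, replace_single, replace_single]
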